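-- pv_equiv track=rewrite | github.com/Akunesquik/Puissance4IA | TestsJeu/IA/recompenseAttaquant.py | longueur_chaine_horizontale
-- ===== SOURCE A (Python) =====
-- def longueur_chaine_horizontale(grille, ligne, colonne):
--     pion_joueur = grille[ligne][colonne]
--     longueur = 1  # Initialise la longueur à 1 (comprend le pion actuel)
--
--     # Recherche de l'alignement à gauche
--     for i in range(colonne - 1, -1, -1):
--         if i >= 0 and grille[ligne][i] == pion_joueur:  # Vérification de la limite de la grille
--             longueur += 1
--         else:
--             break
--
--     # Recherche de l'alignement à droite
--     for i in range(colonne + 1, len(grille[0])):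
--         if i < len(grille[0]) and grille[ligne][i] == pion_joueur:  # Vérification de la limite de la grille
--             longueur += 1
--         else:
--             break
--
--     return recompense_longueur(longueur)
--
-- def recompense_longueur(longueur):
--     recompense = 0
--     if longueur == 1:
--         recompense = 0
--     elif longueur == 2:
--         recompense = 3
--     elif longueur == 3:
--         recompense = 7
--     else:
--         recompense = 500
--     return recompense
-- ===== SOURCE B (Python) =====
-- def longueur_chaine_horizontale(grille, ligne, colonne):
--     row = grille[ligne]
--     runs = []
--     debut = 0
--     for i in range(1, len(row) + 1):
--         if i == len(row) or row[i] != row[i - 1]: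
--             runs.append((debut, i))
--             debut = i
--     debut, fin = next((s, e) for (s, e) in runs if s <= colonne < e)
--     return {1: 0, 2: 3, 3: 7}.get(fin - debut, 500)
-- ===== Notes on version B (the rewrite author's own statement) =====
-- stated objective: alternative
-- what changed: Instead of A's two symmetric outward scans from colonne, B makes one left-to-right pass segmenting the whole row into maximal runs, picks the run containing colonne, and maps its length through a dict table; Pre_ excludes invalid or ragged-overrun indices on which A raises, and negative colonne, on which A's count relies on Python index wraparound while B's run lookup raises StopIteration.
-- intended difference: On ragged grids where the chain through colonne in row grille[ligne] extends past the first row's width len(grille[0]) and the truncated length is at most 3, A returns the reward of the truncated chain while B rewards the full chain length of the actual row, which is the intended horizontal chain length through the cell. — e.g. on longueur_chaine_horizontale([[5], [7, 7]], 1, 0): A returns 0, B returns 3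
-- outside the precondition, e.g. on longueur_chaine_horizontale([[1, 1]], 0, -1): A returns 7, B raises StopIteration; on longueur_chaine_horizontale([[2, 2, 0]], 0, -2): A returns 0, B raises StopIteration
import Mathlib
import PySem

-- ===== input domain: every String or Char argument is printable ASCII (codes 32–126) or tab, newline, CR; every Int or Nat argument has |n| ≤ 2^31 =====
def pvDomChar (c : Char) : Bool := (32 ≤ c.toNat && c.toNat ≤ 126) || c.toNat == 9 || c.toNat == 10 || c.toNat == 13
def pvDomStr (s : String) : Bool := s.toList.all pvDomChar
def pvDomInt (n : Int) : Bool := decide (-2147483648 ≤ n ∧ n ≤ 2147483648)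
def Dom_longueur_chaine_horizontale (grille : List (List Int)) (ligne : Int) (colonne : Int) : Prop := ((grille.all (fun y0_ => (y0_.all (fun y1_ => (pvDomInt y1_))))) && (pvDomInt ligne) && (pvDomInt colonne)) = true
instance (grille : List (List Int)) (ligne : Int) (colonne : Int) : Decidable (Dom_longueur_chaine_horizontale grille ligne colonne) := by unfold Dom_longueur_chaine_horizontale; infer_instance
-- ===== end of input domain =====

-- B replaces A's two symmetric outward scans by one whole-row segmentation pass into maximal
-- runs; the run containing colonne gives the chain length (objective: alternative, same cost).
-- On ragged grids where A's right scan is cut short by the FIRST row's width, B rewards the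
-- full chain of the actual row (stated as the intended difference D_ below).

-- ===== PORT A =====
def recompense_longueur (longueur : Int) : Int :=
  if longueur = 1 then 0
  else if longueur = 2 then 3
  else if longueur = 3 then 7
  else 500

def longueur_chaine_horizontale (grille : List (List Int)) (ligne : Int) (colonne : Int) : Int :=
  let pion_joueur := PySem.List.pyGetD (PySem.List.pyGetD grille ligne []) colonne 0
  -- left scan with break (state: longueur, broken-flag)
  let st1 := (PySem.List.pyRange (colonne - 1) (-1) (-1)).foldl
    (fun (st : Int × Bool) i =>
      if st.2 then st
      else if 0 ≤ i ∧ PySem.List.pyGetD (PySem.List.pyGetD grille ligne []) i 0 = pion_joueur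
      then (st.1 + 1, false) else (st.1, true)) (1, false)
  -- right scan with break
  let w : Int := ((PySem.List.pyGetD grille 0 []).length : Int)
  let st2 := (PySem.List.pyRange (colonne + 1) w 1).foldl
    (fun (st : Int × Bool) i =>
      if st.2 then st
      else if i < w ∧ PySem.List.pyGetD (PySem.List.pyGetD grille ligne []) i 0 = pion_joueur
      then (st.1 + 1, false) else (st.1, true)) (st1.1, false)
  recompense_longueur st2.1

-- ===== PORT B =====
def longueur_chaine_horizontale_alt (grille : List (List Int)) (ligne : Int) (colonne : Int) : Int :=
  let row := PySem.List.pyGetD grille ligne []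
  -- one pass over the row: segment into maximal runs (runs, debut)
  let seg := (PySem.List.pyRange 1 ((row.length : Int) + 1) 1).foldl
    (fun (st : List (Int × Int) × Int) i =>
      if i = (row.length : Int) ∨ PySem.List.pyGetD row i 0 ≠ PySem.List.pyGetD row (i - 1) 0
      then (st.1 ++ [(st.2, i)], i) else st) ([], 0)
  -- next(...): first run containing colonne
  let run := (seg.1.find? (fun r => decide (r.1 ≤ colonne ∧ colonne < r.2))).getD (0, 0)
  PySem.Dict.getD (PySem.Dict.ofList [((1 : Int), (0 : Int)), (2, 3), (3, 7)]) (run.2 - run.1) 500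

-- ===== PRECONDITION & SPEC =====
-- Pre_ admits exactly the inputs where both programs return: it excludes invalid ligne/colonne
-- and the ragged-row overruns past a shorter row's end, on which A raises IndexError, and
-- negative colonne, on which A returns an accidental count via Python's index wraparound while
-- B's run lookup raises StopIteration (no run of the row contains a negative index).
def Pre_longueur_chaine_horizontale (grille : List (List Int)) (ligne : Int) (colonne : Int) : Prop :=
  0 ≤ colonne ∧
  (-(grille.length : Int) ≤ ligne ∧ ligne < (grille.length : Int)) ∧
  colonne < ((PySem.List.pyGetD grille ligne []).length : Int) ∧
  (((PySem.List.pyGetD grille 0 []).length : Int) ≤ ((PySem.List.pyGetD grille ligne []).length : Int) ∨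
   ∃ j ∈ PySem.List.pyRange (colonne + 1) ((PySem.List.pyGetD grille ligne []).length : Int) 1,
     PySem.List.pyGetD (PySem.List.pyGetD grille ligne []) j 0 ≠
       PySem.List.pyGetD (PySem.List.pyGetD grille ligne []) colonne 0)
instance (grille : List (List Int)) (ligne : Int) (colonne : Int) : Decidable (Pre_longueur_chaine_horizontale grille ligne colonne) := by unfold Pre_longueur_chaine_horizontale; infer_instance

def pvWitness_longueur_chaine_horizontale : List (List Int) × Int × Int := ([[1, 1, 0], [0, 1, 1]], 0, 1)

-- On ragged grids where the chain through colonne in row grille[ligne] extends past the FIRST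
-- row's width len(grille[0]), A truncates the chain at that unrelated width and returns the
-- reward of the truncated length (≤ 3) while B rewards the full chain length in the actual row,
-- which is the intended horizontal chain length through the cell.
-- the row Python's grille[ligne] denotes (negative ligne wraps)
def rowOf (g : List (List Int)) (l : Int) : List Int :=
  g.getD (l % (g.length : Int)).toNat []

-- the run through cell c crosses the width (k cells between c and the width), and the
-- truncated chain length is at most 3
abbrev badCap (row : List Int) (c k : Nat) : Prop :=
  k < ((row.drop (c + 1)).takeWhile (· == row.getD c 0)).length ∧
  ((row.take c).reverse.takeWhile (· == row.getD c 0)).length + k ≤ 2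

-- On ragged grids where the chain through colonne in row grille[ligne] extends past the first
-- row's width len(grille[0]) and A's truncated length is at most 3, A returns the reward of the
-- truncated chain while B rewards the full chain length of the actual row, which is the intended
-- horizontal chain length through the cell.
def D_longueur_chaine_horizontale (grille : List (List Int)) (ligne : Int) (colonne : Int) : Prop :=
  badCap (rowOf grille ligne) colonne.toNat ((rowOf grille 0).length - (colonne.toNat + 1))
instance (grille : List (List Int)) (ligne : Int) (colonne : Int) : Decidable (D_longueur_chaine_horizontale grille ligne colonne) := by unfold D_longueur_chaine_horizontale; infer_instance

def Spec_longueur_chaine_horizontale (grille : List (List Int)) (ligne : Int) (colonne : Int) (out : Int) : Prop := ¬ D_longueur_chaine_horizontale grille ligne colonne → out = longueur_chaine_horizontale_alt grille ligne colonne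
instance (grille : List (List Int)) (ligne : Int) (colonne : Int) (out : Int) : Decidable (Spec_longueur_chaine_horizontale grille ligne colonne out) := by unfold Spec_longueur_chaine_horizontale; infer_instance

def pvDiffWitness_longueur_chaine_horizontale : List (List Int) × Int × Int := ([[5], [7, 7]], 1, 0)
def pvDiffWitnessOut_longueur_chaine_horizontale : Int × Int := (0, 3)

-- ===== CLAIM (what is proved, stated in full; the proofs are below) =====
def Claim_unchanged_longueur_chaine_horizontale : Prop := ∀ (grille : List (List Int)) (ligne : Int) (colonne : Int), Dom_longueur_chaine_horizontale grille ligne colonne → Pre_longueur_chaine_horizontale grille ligne colonne → Spec_longueur_chaine_horizontale grille ligne colonne (longueur_chaine_horizontale grille ligne colonne)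
def Claim_exact_longueur_chaine_horizontale : Prop := ∀ (grille : List (List Int)) (ligne : Int) (colonne : Int), Dom_longueur_chaine_horizontale grille ligne colonne → Pre_longueur_chaine_horizontale grille ligne colonne → D_longueur_chaine_horizontale grille ligne colonne → longueur_chaine_horizontale grille ligne colonne ≠ longueur_chaine_horizontale_alt grille ligne colonne
def Claim_changed_longueur_chaine_horizontale : Prop := Dom_longueur_chaine_horizontale (pvDiffWitness_longueur_chaine_horizontale.1) (pvDiffWitness_longueur_chaine_horizontale.2.1) (pvDiffWitness_longueur_chaine_horizontale.2.2) ∧ Pre_longueur_chaine_horizontale (pvDiffWitness_longueur_chaine_horizontale.1) (pvDiffWitness_longueur_chaine_horizontale.2.1) (pvDiffWitness_longueur_chaine_horizontale.2.2) ∧ D_longueur_chaine_horizontale (pvDiffWitness_longueur_chaine_horizontale.1) (pvDiffWitness_longueur_chaine_horizontale.2.1) (pvDiffWitness_longueur_chaine_horizontale.2.2) ∧ longueur_chaine_horizontale (pvDiffWitness_longueur_chaine_horizontale.1) (pvDiffWitness_longueur_chaine_horizontale.2.1) (pvDiffWitness_longueur_chaine_horizontale.2.2) = pvDiffWitnessOut_longueur_chaine_horizontale.1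 ∧ longueur_chaine_horizontale_alt (pvDiffWitness_longueur_chaine_horizontale.1) (pvDiffWitness_longueur_chaine_horizontale.2.1) (pvDiffWitness_longueur_chaine_horizontale.2.2) = pvDiffWitnessOut_longueur_chaine_horizontale.2 ∧ pvDiffWitnessOut_longueur_chaine_horizontale.1 ≠ pvDiffWitnessOut_longueur_chaine_horizontale.2

-- ===== LEMMAS AND PROOFS =====

-- canonical match predicate: in-range and equal to p
abbrev matchP (row : List Int) (p : Int) (i : Int) : Prop :=
  0 ≤ i ∧ i < (row.length : Int) ∧ PySem.List.pyGetD row i 0 = p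

-- downward run: leading successes of P at c-1, c-2, ..., 0
def dRunP (P : Int → Prop) [DecidablePred P] : Nat → Nat
  | 0 => 0
  | c + 1 => if P (c : Int) then dRunP P c + 1 else 0

-- upward run from s with fuel M: leading successes at s, s+1, ...
def uRunP (P : Int → Prop) [DecidablePred P] : Int → Nat → Nat
  | _, 0 => 0
  | s, M + 1 => if P s then uRunP P (s + 1) M + 1 else 0

-- value of a loop with break: count of leading indices of `l` satisfying P
def breakScan (P : Int → Prop) [DecidablePred P] : List Int → Int → Int
  | [], a => a
  | i :: l, a => if P i then breakScan P l (a + 1) else a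

-- run boundary of the row (position j starts a new run, or is 0 or the end)
def Bdry (row : List Int) (j : Nat) : Prop :=
  j = 0 ∨ j = row.length ∨ PySem.List.pyGetD row (j : Int) 0 ≠ PySem.List.pyGetD row ((j : Int) - 1) 0

theorem foldl_break_broken (P : Int → Prop) [DecidablePred P] (l : List Int) (a : Int) :
    l.foldl (fun (st : Int × Bool) i => if st.2 then st else if P i then (st.1 + 1, false) else (st.1, true)) (a, true) = (a, true) := by
  induction l with
  | nil => rfl
  | cons x l ih => simpa using ih

theorem foldl_break_eq (P : Int → Prop) [DecidablePred P] (l : List Int) (a : Int) :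
    (l.foldl (fun (st : Int × Bool) i => if st.2 then st else if P i then (st.1 + 1, false) else (st.1, true)) (a, false)).1 = breakScan P l a := by
  induction l generalizing a with
  | nil => rfl
  | cons x l ih =>
    by_cases h : P x
    · simp [List.foldl_cons, h, breakScan, ih]
    · simp [List.foldl_cons, h, breakScan, foldl_break_broken]

theorem breakScan_down (P : Int → Prop) [DecidablePred P] (c : Nat) (a : Int) :
    breakScan P (PySem.List.pyRange ((c : Int) - 1) (-1) (-1)) a = a + (dRunP P c : Int) := by
  induction c generalizing a with
  | zero => rw [PySem.List.pyRange_neg_one_eq_nil (by omega)]; simp [breakScan, dRunP]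
  | succ c ih =>
    rw [PySem.List.pyRange_neg_one_cons (by omega)]
    have h1 : ((c + 1 : Nat) : Int) - 1 = (c : Int) := by push_cast; omega
    rw [h1]
    by_cases h : P (c : Int)
    · simp only [breakScan, h, if_pos, dRunP, ih]
      push_cast; ring
    · simp [breakScan, h, dRunP]

theorem breakScan_up (P : Int → Prop) [DecidablePred P] (s e : Int) (a : Int) :
    breakScan P (PySem.List.pyRange s e 1) a = a + (uRunP P s (e - s).toNat : Int) := by
  generalize hM : (e - s).toNat = M
  induction M generalizing s a with
  | zero => rw [PySem.List.pyRange_one_eq_nil (by omega)]; simp [breakScan, uRunP]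
  | succ M ih =>
    rw [PySem.List.pyRange_one_cons (by omega)]
    by_cases h : P s
    · simp only [breakScan, h, if_pos, uRunP]
      rw [ih (s+1) (a+1) (by omega)]
      push_cast; ring
    · simp [breakScan, h, uRunP]

theorem dRunP_congr (P Q : Int → Prop) [DecidablePred P] [DecidablePred Q] (c : Nat)
    (h : ∀ j : Nat, j < c → (P j ↔ Q j)) : dRunP P c = dRunP Q c := by
  induction c with
  | zero => rfl
  | succ c ih =>
    have hc := h c (by omega)
    by_cases hp : P (c : Int)
    · simp [dRunP, hp, hc.mp hp, ih (fun j hj => h j (by omega))]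
    · have hq : ¬ Q (c : Int) := fun hq => hp (hc.mpr hq)
      simp [dRunP, hp, hq]

theorem dRunP_eq (P : Int → Prop) [DecidablePred P] (b c : Nat) (hb : b ≤ c)
    (hall : ∀ j : Nat, b ≤ j → j < c → P j) (hstop : b = 0 ∨ ¬ P ((b : Int) - 1)) :
    dRunP P c = c - b := by
  induction c with
  | zero => simp [dRunP]
  | succ c ih =>
    rcases Nat.lt_or_ge b (c+1) with hlt | hge
    · have hp : P (c : Int) := hall c (by omega) (by omega)
      have := ih (by omega) (fun j h1 h2 => hall j h1 (by omega))
      simp [dRunP, hp, this]; omega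
    · have hbc : b = c + 1 := by omega
      have hnp : ¬ P (c : Int) := by
        rcases hstop with h0 | hs
        · omega
        · have : ((b : Int) - 1) = (c : Int) := by omega
          rwa [this] at hs
      simp [dRunP, hnp]; omega

theorem uRunP_le (P : Int → Prop) [DecidablePred P] (s : Int) (M : Nat) : uRunP P s M ≤ M := by
  induction M generalizing s with
  | zero => simp [uRunP]
  | succ M ih =>
    by_cases h : P s
    · simp [uRunP, h]; exact ih (s+1)
    · simp [uRunP, h]

theorem uRunP_mem (P : Int → Prop) [DecidablePred P] (s : Int) (M : Nat) :
    ∀ k : Nat, k < uRunP P s M → P (s + k) := by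
  induction M generalizing s with
  | zero => simp [uRunP]
  | succ M ih =>
    intro k hk
    by_cases h : P s
    · rcases k with _ | k
      · simpa using h
      · simp only [uRunP, h, if_pos] at hk
        have := ih (s+1) k (by omega)
        rwa [show s + ((k+1 : Nat) : Int) = s + 1 + (k : Int) by push_cast; ring]
    · simp [uRunP, h] at hk

theorem uRunP_stop (P : Int → Prop) [DecidablePred P] (s : Int) (M : Nat) :
    uRunP P s M = M ∨ ¬ P (s + (uRunP P s M : Int)) := by
  induction M generalizing s with
  | zero => left; rfl
  | succ M ih =>
    by_cases h : P s
    · rcases ih (s+1) with h1 | h2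
      · left; simp [uRunP, h, h1]
      · right; simp only [uRunP, h, if_pos]
        rwa [show s + ((uRunP P (s+1) M + 1 : Nat) : Int) = s + 1 + (uRunP P (s+1) M : Int) by push_cast; ring]
    · right; simpa [uRunP, h] using h

theorem uRunP_eq (P : Int → Prop) [DecidablePred P] (M : Nat) (s : Int) (u : Nat) (hu : u ≤ M)
    (hall : ∀ k : Nat, k < u → P (s + k)) (hstop : u = M ∨ ¬ P (s + (u : Int))) :
    uRunP P s M = u := by
  induction M generalizing s u with
  | zero => simp [uRunP]; omega
  | succ M ih =>
    rcases u with _ | u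
    · have hnp : ¬ P s := by
        rcases hstop with h0 | hs
        · omega
        · simpa using hs
      simp [uRunP, hnp]
    · have hp : P s := by simpa using hall 0 (by omega)
      have : uRunP P (s+1) M = u := by
        refine ih (s+1) u (by omega) ?_ ?_
        · intro k hk
          have := hall (k+1) (by omega)
          rwa [show s + ((k+1 : Nat) : Int) = s + 1 + (k : Int) by push_cast; ring] at this
        · rcases hstop with h0 | hs
          · left; omega
          · right
            rwa [show s + ((u+1 : Nat) : Int) = s + 1 + (u : Int) by push_cast; ring] at hs
      simp [uRunP, hp, this]

theorem dict_eq_recompense (x : Int) :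
    PySem.Dict.getD (PySem.Dict.ofList [((1 : Int), (0 : Int)), (2, 3), (3, 7)]) x 500 = recompense_longueur x := by
  by_cases h1 : x = 1
  · subst h1; decide
  by_cases h2 : x = 2
  · subst h2; decide
  by_cases h3 : x = 3
  · subst h3; decide
  · simp [PySem.Dict.getD, PySem.Dict.ofList, PySem.Dict.get?, PySem.Dict.empty, PySem.Dict.update,
          PySem.Dict.insert, PySem.Dict.items, List.find?, recompense_longueur, h1, h2, h3,
          show ¬((1:Int) == x) = true by simpa using fun h => h1 h.symm,
          show ¬((2:Int) == x) = true by simpa using fun h => h2 h.symm,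
          show ¬((3:Int) == x) = true by simpa using fun h => h3 h.symm]

theorem key_lemma (row : List Int) (c b k : Nat) (hc : c < row.length)
    (hb : b ≤ c) (hck : c ≤ k) (hkm : k + 1 ≤ row.length)
    (hbd : Bdry row b)
    (hnb : ∀ j : Nat, b < j → j ≤ k → ¬ Bdry row j)
    (hkb : Bdry row (k + 1)) :
    dRunP (matchP row (PySem.List.pyGetD row (c : Int) 0)) c = c - b ∧
    uRunP (matchP row (PySem.List.pyGetD row (c : Int) 0)) ((c : Int) + 1) (row.length - (c + 1)) = k - c := by
  set p := PySem.List.pyGetD row (c : Int) 0 with hp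
  have hchain : ∀ j : Nat, b ≤ j → j ≤ k → PySem.List.pyGetD row (j : Int) 0 = PySem.List.pyGetD row (b : Int) 0 := by
    intro j
    induction j with
    | zero => intro h1 _; have : b = 0 := by omega
              simp [this]
    | succ j ih =>
      intro h1 h2
      rcases Nat.lt_or_ge b (j+1) with hlt | hge
      · have hnbj := hnb (j+1) hlt h2
        unfold Bdry at hnbj
        push_neg at hnbj
        have heq := hnbj.2.2
        have e1 : ((j + 1 : Nat) : Int) - 1 = (j : Nat) := by push_cast; omega
        rw [e1] at heq
        rw [heq]
        exact ih (by omega) (by omega)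
      · have : b = j + 1 := by omega
        simp [this]
  have hpb : PySem.List.pyGetD row (b : Int) 0 = p := (hchain c hb hck).symm
  constructor
  · apply dRunP_eq _ b c hb
    · intro j h1 h2
      refine ⟨by omega, by push_cast; omega, ?_⟩
      rw [hchain j h1 (by omega), hpb]
    · rcases hbd with h0 | hm | hne
      · exact Or.inl h0
      · omega
      · right
        intro hmp
        exact hne (by rw [hchain b le_rfl (by omega), hpb, hmp.2.2])
  · apply uRunP_eq _ _ _ (k - c) (by omega)
    · intro j hj
      have e1 : ((c : Int) + 1 + (j : Nat)) = ((c + 1 + j : Nat) : Int) := by push_cast; ring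
      rw [e1]
      refine ⟨by positivity, by push_cast; omega, ?_⟩
      rw [hchain (c+1+j) (by omega) (by omega), hpb]
    · rcases Nat.eq_or_lt_of_le hkm with he | hlt
      · left; omega
      · right
        have e1 : ((c : Int) + 1 + ((k - c : Nat) : Int)) = ((k + 1 : Nat) : Int) := by push_cast; omega
        rw [e1]
        rcases hkb with h0 | hm | hne
        · omega
        · omega
        · intro hmp
          have e2 : ((k + 1 : Nat) : Int) - 1 = ((k : Nat) : Int) := by push_cast; omega
          rw [e2] at hne
          exact hne (by rw [hmp.2.2, hchain k (by omega) le_rfl, hpb])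

-- the segmentation fold of port B, cut at upper index k
def segk (row : List Int) (k : Nat) : List (Int × Int) × Int :=
  (PySem.List.pyRange 1 ((k : Int) + 1) 1).foldl
    (fun (st : List (Int × Int) × Int) i =>
      if i = (row.length : Int) ∨ PySem.List.pyGetD row i 0 ≠ PySem.List.pyGetD row (i - 1) 0
      then (st.1 ++ [(st.2, i)], i) else st) ([], 0)

theorem segk_succ (row : List Int) (k : Nat) :
    segk row (k + 1) =
      (fun (st : List (Int × Int) × Int) i =>
        if i = (row.length : Int) ∨ PySem.List.pyGetD row i 0 ≠ PySem.List.pyGetD row (i - 1) 0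
        then (st.1 ++ [(st.2, i)], i) else st) (segk row k) ((k : Int) + 1) := by
  unfold segk
  rw [show ((k + 1 : Nat) : Int) + 1 = ((k : Int) + 1) + 1 by push_cast; ring,
      PySem.List.pyRange_one_succ_right (by omega), List.foldl_append]
  rfl

theorem seg_invariant (row : List Int) (c : Nat) (hc : c < row.length) :
    ∀ k : Nat, k ≤ row.length →
    ∃ b : Nat, b ≤ k ∧ (segk row k).2 = (b : Int) ∧ Bdry row b ∧
      (∀ j : Nat, b < j → j ≤ k → ¬ Bdry row j) ∧
      ((c < b ∧ (segk row k).1.find? (fun r => decide (r.1 ≤ (c : Int) ∧ (c : Int) < r.2)) =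
          some ((c : Int) - (dRunP (matchP row (PySem.List.pyGetD row (c : Int) 0)) c : Int),
                (c : Int) + 1 + (uRunP (matchP row (PySem.List.pyGetD row (c : Int) 0)) ((c : Int) + 1) (row.length - (c + 1)) : Int))) ∨
       (b ≤ c ∧ (segk row k).1.find? (fun r => decide (r.1 ≤ (c : Int) ∧ (c : Int) < r.2)) = none)) := by
  intro k
  induction k with
  | zero =>
    intro _
    refine ⟨0, le_rfl, ?_, Or.inl rfl, by omega, Or.inr ⟨by omega, ?_⟩⟩
    · unfold segk; rw [PySem.List.pyRange_one_eq_nil (by omega)]; rfl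
    · unfold segk; rw [PySem.List.pyRange_one_eq_nil (by omega)]; rfl
  | succ k ih =>
    intro hk1
    obtain ⟨b, hbk, hb2, hbd, hnb, hfind⟩ := ih (by omega)
    rw [segk_succ]
    beta_reduce
    by_cases hcond : ((k : Int) + 1 = (row.length : Int) ∨
        PySem.List.pyGetD row ((k : Int) + 1) 0 ≠ PySem.List.pyGetD row ((k : Int) + 1 - 1) 0)
    · -- boundary at k+1: close the run [b, k+1)
      have hbdk1 : Bdry row (k + 1) := by
        rcases hcond with h | h
        · right; left; omega
        · right; right
          push_cast
          exact h
      refine ⟨k + 1, le_rfl, ?_, hbdk1, by omega, ?_⟩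
      · simp only [hcond, if_pos]; push_cast; ring
      · rcases hfind with ⟨hcb, hf⟩ | ⟨hbc, hf⟩
        · left
          refine ⟨by omega, ?_⟩
          simp only [hcond, if_pos, List.find?_append, hf, Option.some_or]
        · rcases Nat.lt_or_ge c (k + 1) with hck1 | hck1
          · have hkey := key_lemma row c b k hc hbc (by omega) hk1 hbd hnb hbdk1
            left
            refine ⟨by omega, ?_⟩
            simp only [hcond, if_pos, List.find?_append, hf, Option.none_or]
            rw [hb2, hkey.1, hkey.2]
            simp only [List.find?_cons, List.find?_nil]
            have hpred : (decide ((b : Int) ≤ (c : Int) ∧ (c : Int) < (k : Int) + 1)) = true := by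
              simp only [decide_eq_true_eq]; omega
            simp only [hpred, cond_true]
            congr 2 <;> omega
          · right
            refine ⟨by omega, ?_⟩
            simp only [hcond, if_pos, List.find?_append, hf, Option.none_or]
            rw [hb2]
            simp only [List.find?_cons, List.find?_nil]
            have hpred : (decide ((b : Int) ≤ (c : Int) ∧ (c : Int) < (k : Int) + 1)) = false := by
              simp only [decide_eq_false_iff_not]; intro hx; omega
            simp only [hpred, cond_false]
    · have hnbk1 : ¬ Bdry row (k + 1) := by
        intro h
        rcases h with h | h | h
        · omega
        · exact hcond (Or.inl (by push_cast; omega))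
        · apply hcond; right
          push_cast at h
          exact h
      refine ⟨b, by omega, ?_, hbd, ?_, ?_⟩
      · rw [if_neg hcond]; exact hb2
      · intro j h1 h2
        rcases Nat.lt_or_ge k j with hj | hj
        · have : j = k + 1 := by omega
          rw [this]; exact hnbk1
        · exact hnb j h1 (by omega)
      · rw [if_neg hcond]; exact hfind

theorem seg_find (row : List Int) (c : Nat) (hc : c < row.length) :
    (((PySem.List.pyRange 1 ((row.length : Int) + 1) 1).foldl
      (fun (st : List (Int × Int) × Int) i =>
        if i = (row.length : Int) ∨ PySem.List.pyGetD row i 0 ≠ PySem.List.pyGetD row (i - 1) 0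
        then (st.1 ++ [(st.2, i)], i) else st) ([], 0)).1.find?
      (fun r => decide (r.1 ≤ (c : Int) ∧ (c : Int) < r.2))) =
    some ((c : Int) - (dRunP (matchP row (PySem.List.pyGetD row (c : Int) 0)) c : Int),
          (c : Int) + 1 + (uRunP (matchP row (PySem.List.pyGetD row (c : Int) 0)) ((c : Int) + 1) (row.length - (c + 1)) : Int)) := by
  obtain ⟨b, hbk, hb2, hbd, hnb, hfind⟩ := seg_invariant row c hc row.length le_rfl
  have hbm : b = row.length := by
    by_contra hne
    exact hnb row.length (by omega) le_rfl (Or.inr (Or.inl rfl))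
  rcases hfind with ⟨_, hf⟩ | ⟨hbc, _⟩
  · unfold segk at hf
    exact hf
  · omega

theorem a_right (row : List Int) (W c : Nat) (hc : c < row.length)
    (hpre : (W : Int) ≤ (row.length : Int) ∨
      ∃ j ∈ PySem.List.pyRange ((c : Int) + 1) (row.length : Int) 1,
        PySem.List.pyGetD row j 0 ≠ PySem.List.pyGetD row (c : Int) 0) :
    uRunP (fun i => i < (W : Int) ∧ PySem.List.pyGetD row i 0 = PySem.List.pyGetD row (c : Int) 0)
        ((c : Int) + 1) (((W : Int) - ((c : Int) + 1)).toNat) =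
      min (uRunP (matchP row (PySem.List.pyGetD row (c : Int) 0)) ((c : Int) + 1) (row.length - (c + 1))) (W - (c + 1)) := by
  set p := PySem.List.pyGetD row (c : Int) 0 with hp
  set R := uRunP (matchP row p) ((c : Int) + 1) (row.length - (c + 1)) with hR
  have hMA : (((W : Int) - ((c : Int) + 1)).toNat) = W - (c + 1) := by omega
  rw [hMA]
  have hnoend : R < W - (c + 1) → c + 1 + R ≠ row.length := by
    intro hRW hend
    have hmW : row.length < W := by omega
    rcases hpre with hle | ⟨j, hjmem, hjne⟩
    · omega
    · rw [PySem.List.mem_pyRange_one] at hjmem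
      have hk : (j - ((c : Int) + 1)).toNat < R := by omega
      have := uRunP_mem (matchP row p) ((c : Int) + 1) (row.length - (c + 1)) _ hk
      have hj : (c : Int) + 1 + ((j - ((c : Int) + 1)).toNat : Int) = j := by omega
      rw [hj] at this
      exact hjne this.2.2
  apply uRunP_eq
  · exact min_le_right _ _
  · intro k hk
    have hkR : k < R := lt_of_lt_of_le hk (min_le_left _ _)
    have := uRunP_mem (matchP row p) ((c : Int) + 1) (row.length - (c + 1)) k hkR
    exact ⟨by have := lt_of_lt_of_le hk (min_le_right _ _); omega, this.2.2⟩
  · rcases Nat.lt_or_ge R (W - (c + 1)) with hlt | hge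
    swap
    · left; omega
    · right
      rw [min_eq_left (by omega)]
      rcases uRunP_stop (matchP row p) ((c : Int) + 1) (row.length - (c + 1)) with hend | hnm
      · exact absurd (by omega : c + 1 + R = row.length) (hnoend hlt)
      · intro hcon
        apply hnm
        refine ⟨by positivity, ?_, hcon.2⟩
        have hR_le : R ≤ row.length - (c + 1) := uRunP_le _ _ _
        have : c + 1 + R ≠ row.length := hnoend hlt
        omega

-- both ports, reduced to recompense of their chain lengths (shared by the two verdicts)
theorem ports_reduced (grille : List (List Int)) (ligne colonne : Int)
    (hpre : Pre_longueur_chaine_horizontale grille ligne colonne) (c : Nat) (hcol : colonne = (c : Int)) :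
    longueur_chaine_horizontale grille ligne colonne =
      recompense_longueur (1 + (dRunP (matchP (PySem.List.pyGetD grille ligne []) (PySem.List.pyGetD (PySem.List.pyGetD grille ligne []) (c : Int) 0)) c : Int) +
        ((min (uRunP (matchP (PySem.List.pyGetD grille ligne []) (PySem.List.pyGetD (PySem.List.pyGetD grille ligne []) (c : Int) 0)) ((c : Int) + 1) ((PySem.List.pyGetD grille ligne []).length - (c + 1)))
             ((PySem.List.pyGetD grille 0 []).length - (c + 1)) : Nat) : Int)) ∧
    longueur_chaine_horizontale_alt grille ligne colonne =
      recompense_longueur (1 + (dRunP (matchP (PySem.List.pyGetD grille ligne []) (PySem.List.pyGetD (PySem.List.pyGetD grille ligne []) (c : Int) 0)) c : Int) +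
        (uRunP (matchP (PySem.List.pyGetD grille ligne []) (PySem.List.pyGetD (PySem.List.pyGetD grille ligne []) (c : Int) 0)) ((c : Int) + 1) ((PySem.List.pyGetD grille ligne []).length - (c + 1)) : Int)) := by
  obtain ⟨h0, hlig, hcol', hpre4⟩ := hpre
  subst hcol
  simp only [longueur_chaine_horizontale, longueur_chaine_horizontale_alt]
  set row := PySem.List.pyGetD grille ligne [] with hrow
  set W := (PySem.List.pyGetD grille 0 []).length with hW
  have hc : c < row.length := by exact_mod_cast hcol'
  constructor
  · rw [foldl_break_eq (fun i => i < (W : Int) ∧ PySem.List.pyGetD row i 0 = PySem.List.pyGetD row (c : Int) 0)]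
    rw [foldl_break_eq (fun i => 0 ≤ i ∧ PySem.List.pyGetD row i 0 = PySem.List.pyGetD row (c : Int) 0)]
    rw [breakScan_down, breakScan_up]
    rw [dRunP_congr (fun i => 0 ≤ i ∧ PySem.List.pyGetD row i 0 = PySem.List.pyGetD row (c : Int) 0)
          (matchP row (PySem.List.pyGetD row (c : Int) 0)) c
          (fun j hj => by
            unfold matchP
            constructor
            · rintro ⟨h1, h2⟩; exact ⟨h1, by push_cast; omega, h2⟩
            · rintro ⟨h1, _, h3⟩; exact ⟨h1, h3⟩)]
    rw [a_right row W c hc hpre4]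
  · rw [seg_find row c hc]
    simp only [Option.getD_some]
    rw [dict_eq_recompense]
    congr 1
    ring

-- bridges between the takeWhile run length on drop and the scan characterization
theorem matchP_iff (row : List Int) (p : Int) (s : Nat) (hs : s < row.length) :
    matchP row p (s : Int) ↔ row[s] = p := by
  constructor
  · rintro ⟨-, -, h⟩
    rwa [PySem.List.pyGetD_natCast, List.getD_eq_getElem _ _ hs] at h
  · intro h
    exact ⟨by positivity, by exact_mod_cast hs, by rwa [PySem.List.pyGetD_natCast, List.getD_eq_getElem _ _ hs]⟩

theorem tw_drop (row : List Int) (p : Int) (s : Nat) :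
    uRunP (matchP row p) ((s : Nat) : Int) (row.length - s) = ((row.drop s).takeWhile (· == p)).length := by
  generalize hM : row.length - s = M
  induction M generalizing s with
  | zero =>
    rw [List.drop_eq_nil_of_le (by omega)]
    rfl
  | succ M ih =>
    have hs : s < row.length := by omega
    rw [List.drop_eq_getElem_cons hs]
    have hrec := ih (s + 1) (by omega)
    by_cases h : row[s] = p
    · rw [show (((s + 1 : Nat)) : Int) = (s : Int) + 1 from by push_cast; ring] at hrec
      simp only [uRunP, List.takeWhile_cons, matchP_iff row p s hs, h, if_pos, beq_self_eq_true, beq_iff_eq,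
        List.length_cons, hrec]
    · rw [List.takeWhile_cons_of_neg (by simp [h])]
      simp [uRunP, matchP_iff row p s hs, h]

theorem tw_take (row : List Int) (p : Int) (c : Nat) (hc : c ≤ row.length) :
    dRunP (matchP row p) c = (((row.take c).reverse).takeWhile (· == p)).length := by
  induction c with
  | zero => rfl
  | succ c ih =>
    have hcl : c < row.length := by omega
    rw [List.take_add_one, List.getElem?_eq_getElem hcl]
    simp only [Option.toList_some, List.reverse_append, List.reverse_cons, List.reverse_nil,
      List.nil_append, List.singleton_append]
    by_cases h : row[c] = p
    · simp [dRunP, List.takeWhile_cons, matchP_iff row p c hcl, h, beq_iff_eq, ih (by omega)]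
    · simp [dRunP, List.takeWhile_cons, matchP_iff row p c hcl, h, beq_iff_eq]

theorem uR_tw (row : List Int) (p : Int) (c : Nat) :
    uRunP (matchP row p) ((c : Int) + 1) (row.length - (c + 1)) = ((row.drop (c + 1)).takeWhile (· == p)).length := by
  have := tw_drop row p (c + 1)
  rwa [show (((c + 1 : Nat)) : Int) = (c : Int) + 1 from by push_cast; ring] at this

-- wrapped row access of D_ agrees with Python indexing for in-range ligne
theorem row_emod (grille : List (List Int)) (ligne : Int)
    (h1 : -(grille.length : Int) ≤ ligne) (h2 : ligne < (grille.length : Int)) :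
    grille.getD (ligne % (grille.length : Int)).toNat [] = PySem.List.pyGetD grille ligne [] := by
  by_cases h0 : 0 ≤ ligne
  · rw [Int.emod_eq_of_lt h0 h2, PySem.List.pyGetD_eq_getElem _ _ h0 h2,
        List.getD_eq_getElem _ _ (by omega)]
  · have hm : ligne % (grille.length : Int) = ligne + grille.length := by
      calc ligne % (grille.length : Int) = (ligne + grille.length) % grille.length :=
            (Int.add_emod_right _ _).symm
        _ = ligne + grille.length := Int.emod_eq_of_lt (by omega) (by omega)
    have hk : ligne = -(((-ligne).toNat : Nat) : Int) := by omega
    have hR : PySem.List.pyGetD grille ligne [] = grille.getD (grille.length - (-ligne).toNat) [] := by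
      rw [List.getD_eq_getElem _ _ (by omega)]
      calc PySem.List.pyGetD grille ligne []
          = PySem.List.pyGetD grille (-(((-ligne).toNat : Nat) : Int)) [] := by rw [← hk]
        _ = grille[grille.length - (-ligne).toNat] :=
            PySem.List.pyGetD_neg_natCast _ _ _ (by omega) (by omega)
    rw [hm, hR]
    congr 1
    omega

-- row 0 of D_ is Python's grille[0] access
theorem rowOf_zero (grille : List (List Int)) : rowOf grille 0 = PySem.List.pyGetD grille 0 [] := by
  cases grille <;> simp [rowOf, PySem.List.pyGetD, PySem.List.pyIdx?, PySem.List.pyGet?]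

-- translate a D_-shaped hypothesis to the proof's uRunP/dRunP characterization
theorem D_iff (grille : List (List Int)) (ligne : Int) (c : Nat)
    (hlig : -(grille.length : Int) ≤ ligne ∧ ligne < (grille.length : Int))
    (hcl : c < (PySem.List.pyGetD grille ligne []).length) :
    D_longueur_chaine_horizontale grille ligne (c : Int) ↔
      (max 0 (((PySem.List.pyGetD grille 0 []).length : Int) - ((c : Int) + 1)) <
         (uRunP (matchP (PySem.List.pyGetD grille ligne []) (PySem.List.pyGetD (PySem.List.pyGetD grille ligne []) (c : Int) 0))
           ((c : Int) + 1) ((PySem.List.pyGetD grille ligne []).length - (c + 1)) : Int) ∧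
       (dRunP (matchP (PySem.List.pyGetD grille ligne []) (PySem.List.pyGetD (PySem.List.pyGetD grille ligne []) (c : Int) 0)) c : Int)
         + 1 + max 0 (((PySem.List.pyGetD grille 0 []).length : Int) - ((c : Int) + 1)) ≤ 3) := by
  unfold D_longueur_chaine_horizontale badCap
  simp only [Int.toNat_natCast]
  rw [rowOf_zero,
      show rowOf grille ligne = PySem.List.pyGetD grille ligne [] from
        row_emod grille ligne hlig.1 hlig.2,
      ← PySem.List.pyGetD_natCast, ← uR_tw, ← tw_take _ _ _ (le_of_lt hcl)]
  omega

-- ===== VERDICT (by name: the statement is the Claim_ definition above) =====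
-- recompense is 500 from 4 on
theorem recompense_ge_four (x : Int) (hx : 4 ≤ x) : recompense_longueur x = 500 := by
  unfold recompense_longueur
  split_ifs <;> omega

-- below 4 recompense separates any two distinct lengths
theorem recompense_ne (x y : Int) (h1 : 1 ≤ x) (h3 : x ≤ 3) (hxy : x < y) :
    recompense_longueur x ≠ recompense_longueur y := by
  unfold recompense_longueur
  split_ifs <;> omega

-- ===== VERDICT (by name: the statement is the Claim_ definition above) =====
theorem longueur_chaine_horizontale_spec : Claim_unchanged_longueur_chaine_horizontale := by
  intro grille ligne colonne hdom hpre
  unfold Spec_longueur_chaine_horizontale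
  intro hnd
  have h0c : (0 : Int) ≤ colonne := hpre.1
  obtain ⟨c, hcol⟩ : ∃ c : Nat, colonne = (c : Int) := ⟨colonne.toNat, by omega⟩
  obtain ⟨hA, hB⟩ := ports_reduced grille ligne colonne hpre c hcol
  rw [hA, hB]
  subst hcol
  obtain ⟨h0, hlig, hcol', hpre4⟩ := hpre
  rw [D_iff grille ligne c hlig (by exact_mod_cast hcol')] at hnd
  set row := PySem.List.pyGetD grille ligne [] with hrow
  set W := (PySem.List.pyGetD grille 0 []).length with hW
  set p := PySem.List.pyGetD row (c : Int) 0 with hp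
  set dR := dRunP (matchP row p) c with hdR
  set uR := uRunP (matchP row p) ((c : Int) + 1) (row.length - (c + 1)) with huR
  set mB := W - (c + 1) with hmB
  rcases Nat.lt_or_ge mB uR with hlt | hle
  · have hbig : ¬ ((dR : Int) + 1 + max 0 ((W : Int) - ((c : Int) + 1)) ≤ 3) := by
      intro hsm
      exact hnd ⟨by omega, hsm⟩
    have : min uR mB = mB := by omega
    rw [this]
    rw [recompense_ge_four _ (by omega), recompense_ge_four _ (by omega)]
  · have : min uR mB = uR := by omega
    rw [this]

theorem longueur_chaine_horizontale_changed : Claim_changed_longueur_chaine_horizontale := by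
  unfold Claim_changed_longueur_chaine_horizontale; decide

theorem longueur_chaine_horizontale_tight : Claim_exact_longueur_chaine_horizontale := by
  intro grille ligne colonne hdom hpre hd
  have h0c : (0 : Int) ≤ colonne := hpre.1
  obtain ⟨c, hcol⟩ : ∃ c : Nat, colonne = (c : Int) := ⟨colonne.toNat, by omega⟩
  obtain ⟨hA, hB⟩ := ports_reduced grille ligne colonne hpre c hcol
  rw [hA, hB]
  subst hcol
  rw [D_iff grille ligne c hpre.2.1 (by exact_mod_cast hpre.2.2.1)] at hd
  obtain ⟨hcut, hsm⟩ := hd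
  set row := PySem.List.pyGetD grille ligne [] with hrow
  set W := (PySem.List.pyGetD grille 0 []).length with hW
  set p := PySem.List.pyGetD row (c : Int) 0 with hp
  set dR := dRunP (matchP row p) c with hdR
  set uR := uRunP (matchP row p) ((c : Int) + 1) (row.length - (c + 1)) with huR
  have hlt : (W : Int) - ((c : Int) + 1) < (uR : Int) := lt_of_le_of_lt (le_max_right _ _) hcut
  have h0m : (0 : Int) ≤ max 0 ((W : Int) - ((c : Int) + 1)) := le_max_left _ _
  have hmin : min uR (W - (c + 1)) = W - (c + 1) := by omega
  rw [hmin]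
  apply recompense_ne
  · omega
  · have : ((W - (c + 1) : Nat) : Int) ≤ max 0 ((W : Int) - ((c : Int) + 1)) := by omega
    omega
  · have : ((W - (c + 1) : Nat) : Int) ≤ max 0 ((W : Int) - ((c : Int) + 1)) := by omega
    omega
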